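-- pv_equiv track=rewrite | github.com/Vida0822/Programmers | 백준/Gold/7490. 0 만들기/0 만들기.py | check
-- ===== SOURCE A (Python) =====
-- def check(sent):
--     # sent = sent.strip() --> 양끝 공백만 제거
--     sent = sent.replace(' ', '')
--
--     res = 0
--     oper = ''
--     flag = '+'
--     for i in range(len(sent)) :
--         if sent[i] in ('+', '-'):
--             if flag == '+':
--                 res += int(oper)
--             else:
--                 res -= int(oper)
--             flag = sent[i]
--             oper = ''
--         else :
--             oper += sent[i]
--
--     if flag == '+':
--         res += int(oper)
--     else:
--         res -= int(oper)
--     if res == 0 :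
--         return True
--     else:
--         return False
-- ===== SOURCE B (Python) =====
-- def check(sent):
--     # consume the expression term by term: scan to the next operator, slice the
--     # term out, fold it into a running signed total
--     s = sent.replace(' ', '')
--     total = 0
--     sign = 1
--     while True:
--         i = 0
--         while i < len(s) and s[i] not in '+-':
--             i += 1
--         if i == len(s):
--             total += sign * int(s)
--             return total == 0
--         total += sign * int(s[:i])
--         sign = 1 if s[i] == '+' else -1
--         s = s[i + 1:]
-- ===== Notes on version B (the rewrite author's own statement) =====
-- stated objective: alternative
-- what changed: A scans char-by-char, growing a digit buffer and a '+'/'-' flag character; B consumes the string term by term (scan to the next operator, slice the term out, fold it into a running total with an integer sign), with no character buffer.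
import Mathlib
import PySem

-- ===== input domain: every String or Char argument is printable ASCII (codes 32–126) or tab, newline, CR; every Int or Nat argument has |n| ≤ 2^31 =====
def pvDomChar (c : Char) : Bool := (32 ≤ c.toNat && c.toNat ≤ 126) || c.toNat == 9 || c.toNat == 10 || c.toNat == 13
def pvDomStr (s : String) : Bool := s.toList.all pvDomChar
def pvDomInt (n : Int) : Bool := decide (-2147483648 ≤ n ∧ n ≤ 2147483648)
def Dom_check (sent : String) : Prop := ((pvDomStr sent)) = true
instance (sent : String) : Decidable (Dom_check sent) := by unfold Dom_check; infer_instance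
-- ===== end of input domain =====

-- B consumes the expression term by term (scan-to-operator + slice + signed total) instead of
-- A's char-by-char loop with a digit buffer and a flag character; same cost, different decomposition.

-- int(cs): Python raises ValueError exactly when ofChars? is none; those inputs are outside Pre_check,
-- so the port may return the (never-claimed) default 0 there.
def pvToInt (cs : List Char) : Int := (PySem.Int.ofChars? cs).getD 0

-- ===== PORT A =====
-- A's loop state (res, oper, flag); the Python string `oper` is modelled as a List Char.
def checkStep (st : Int × List Char × Char) (c : Char) : Int × List Char × Char :=
  match st with
  | (res, oper, flag) =>
    if c = '+' ∨ c = '-' then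
      ((if flag = '+' then res + pvToInt oper else res - pvToInt oper), ([] : List Char), c)
    else (res, oper ++ [c], flag)

def check (sent : String) : Bool :=
  let s := (PySem.Str.replace sent " " "").toList
  let st := s.foldl checkStep (0, ([] : List Char), '+')
  let res := if st.2.2 = '+' then st.1 + pvToInt st.2.1 else st.1 - pvToInt st.2.1
  res == 0

-- ===== PORT B =====
-- the inner `while i < len(s) and s[i] not in '+-': i += 1` scan
def firstOp : List Char → Nat
  | [] => 0
  | c :: r => if c = '+' ∨ c = '-' then 0 else firstOp r + 1

-- (firstOp t ≤ t.length always, so Python's `i == len(s)` exit test is the negation of `i < len(s)`)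
-- the outer `while True` loop over (s, total, sign)
def valueLoop (t : List Char) (total sign : Int) : Int :=
  if h : firstOp t < t.length then
    valueLoop (t.drop (firstOp t + 1)) (total + sign * pvToInt (t.take (firstOp t)))
      (if t[firstOp t] = '+' then 1 else -1)
  else total + sign * pvToInt t
termination_by t.length
decreasing_by simp; omega

def check_alt (sent : String) : Bool :=
  valueLoop (PySem.Str.replace sent " " "").toList 0 1 == 0

-- ===== PRECONDITION & SPEC =====
-- the maximal operand segments between '+'/'-' characters (an independent splitter, used only by Pre_)
def pvSegs : List Char → List (List Char)
  | [] => [[]]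
  | c :: r =>
    if c = '+' ∨ c = '-' then [] :: pvSegs r
    else
      match pvSegs r with
      | s :: ss => (c :: s) :: ss
      | [] => [[c]]

-- Exactly the inputs where Python A returns: after removing spaces, every operand segment between
-- '+'/'-' signs is a valid int() literal (otherwise A raises ValueError, and so does B).
def Pre_check (sent : String) : Prop :=
  ∀ seg ∈ pvSegs (PySem.Str.replace sent " " "").toList, (PySem.Int.ofChars? seg).isSome
instance (sent : String) : Decidable (Pre_check sent) := by unfold Pre_check; infer_instance

def pvWitness_check : String := "1 + 2 - 3"

def Spec_check (sent : String) (out : Bool) : Prop := out = check_alt sent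
instance (sent : String) (out : Bool) : Decidable (Spec_check sent out) := by unfold Spec_check; infer_instance

-- ===== CLAIM (what is proved, stated in full; the proofs are below) =====
def Claim_equal_check : Prop := ∀ (sent : String), Dom_check sent → Pre_check sent → Spec_check sent (check sent)

-- ===== LEMMAS AND PROOFS =====

theorem firstOp_no_op (l : List Char) (h : ∀ c ∈ l, ¬(c = '+' ∨ c = '-')) :
    firstOp l = l.length := by
  induction l with
  | nil => rfl
  | cons c r ih =>
    have hc := h c (by simp)
    simp [firstOp, hc]
    exact ih fun x hx => h x (by simp [hx])

theorem firstOp_append_op (oper : List Char) (c : Char) (rest : List Char)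
    (h : ∀ x ∈ oper, ¬(x = '+' ∨ x = '-')) (hc : c = '+' ∨ c = '-') :
    firstOp (oper ++ c :: rest) = oper.length := by
  induction oper with
  | nil => simp [firstOp, hc]
  | cons a r ih =>
    have ha := h a (by simp)
    simp [firstOp, ha]
    exact ih fun x hx => h x (by simp [hx])

theorem valueLoop_no_op (l : List Char) (total sign : Int)
    (h : ∀ c ∈ l, ¬(c = '+' ∨ c = '-')) :
    valueLoop l total sign = total + sign * pvToInt l := by
  rw [valueLoop]
  simp [firstOp_no_op l h]

theorem valueLoop_append_op (oper : List Char) (c : Char) (rest : List Char) (total sign : Int)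
    (h : ∀ x ∈ oper, ¬(x = '+' ∨ x = '-')) (hc : c = '+' ∨ c = '-') :
    valueLoop (oper ++ c :: rest) total sign
      = valueLoop rest (total + sign * pvToInt oper) (if c = '+' then 1 else -1) := by
  rw [valueLoop]
  have hf : firstOp (oper ++ c :: rest) = oper.length := firstOp_append_op oper c rest h hc
  have hlt : firstOp (oper ++ c :: rest) < (oper ++ c :: rest).length := by
    simp [hf]
  rw [dif_pos hlt]
  have hget : (oper ++ c :: rest)[firstOp (oper ++ c :: rest)]'hlt = c := by
    simp [hf]
  have htake : (oper ++ c :: rest).take (firstOp (oper ++ c :: rest)) = oper := by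
    simp [hf]
  have hdrop : (oper ++ c :: rest).drop (firstOp (oper ++ c :: rest) + 1) = rest := by
    rw [hf, show oper ++ c :: rest = (oper ++ [c]) ++ rest by simp,
      show oper.length + 1 = (oper ++ [c]).length by simp, List.drop_left]
  rw [hget, htake, hdrop]

theorem loop_eq (l : List Char) (res : Int) (oper : List Char) (flag : Char)
    (hop : ∀ c ∈ oper, ¬(c = '+' ∨ c = '-')) :
    (if (l.foldl checkStep (res, oper, flag)).2.2 = '+'
      then (l.foldl checkStep (res, oper, flag)).1 + pvToInt (l.foldl checkStep (res, oper, flag)).2.1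
      else (l.foldl checkStep (res, oper, flag)).1 - pvToInt (l.foldl checkStep (res, oper, flag)).2.1)
    = valueLoop (oper ++ l) res (if flag = '+' then 1 else -1) := by
  induction l generalizing res oper flag with
  | nil =>
    rw [List.append_nil, valueLoop_no_op oper res _ hop]
    by_cases hf : flag = '+' <;> simp [hf] <;> ring
  | cons c rest ih =>
    by_cases hc : c = '+' ∨ c = '-'
    · have hstep : checkStep (res, oper, flag) c
          = ((if flag = '+' then res + pvToInt oper else res - pvToInt oper), ([] : List Char), c) := by
        simp [checkStep, hc]
      rw [List.foldl_cons, hstep, ih _ _ _ (by simp),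
        valueLoop_append_op oper c rest res _ hop hc, List.nil_append]
      congr 1
      by_cases hf : flag = '+' <;> simp [hf] <;> ring
    · have hstep : checkStep (res, oper, flag) c = (res, oper ++ [c], flag) := by
        simp [checkStep, hc]
      rw [List.foldl_cons, hstep,
        ih res (oper ++ [c]) flag (by
          intro x hx
          rcases List.mem_append.1 hx with h1 | h1
          · exact hop x h1
          · simp at h1; subst h1; exact hc),
        List.append_assoc, List.singleton_append]

-- ===== VERDICT (by name: the statement is the Claim_ definition above) =====
theorem check_spec : Claim_equal_check := by
  intro sent _ _
  unfold Spec_check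
  simp only [check, check_alt]
  have h := loop_eq (PySem.Str.replace sent " " "").toList 0 [] '+' (by simp)
  rw [List.nil_append, if_pos rfl] at h
  rw [h]
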